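-- pv_equiv track=rewrite | github.com/wzh-2309/Requests-Analysis-Project | metrics_engine.py | calculate_raw_metrics
-- ===== SOURCE A (Python) =====
-- def calculate_raw_metrics(file_content):
--     """计算原始代码行数指标"""
--     lines = file_content.splitlines()
--     loc = len(lines)
--     blank_lines = sum(1 for line in lines if not line.strip())
--     comment_lines = sum(1 for line in lines if line.strip().startswith('#'))
--     return {
--         "LOC": loc,
--         "Blank": blank_lines,
--         "Comment": comment_lines,
--         "CodeOnly": loc - blank_lines - comment_lines
--     }
-- ===== SOURCE B (Python) =====
-- def calculate_raw_metrics(file_content):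
--     loc = blank = comment = code = 0
--     for line in file_content.splitlines():
--         loc += 1
--         stripped = line.strip()
--         if not stripped:
--             blank += 1
--         elif stripped.startswith('#'):
--             comment += 1
--         else:
--             code += 1
--     return {"LOC": loc, "Blank": blank, "Comment": comment, "CodeOnly": code}
-- ===== Notes on version B (the rewrite author's own statement) =====
-- stated objective: alternative
-- what changed: replaces three separate scans of the line list (len plus two generator sums, stripping each line twice) with a single classification pass keeping four running counters, CodeOnly counted directly instead of by subtraction
import Mathlib
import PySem

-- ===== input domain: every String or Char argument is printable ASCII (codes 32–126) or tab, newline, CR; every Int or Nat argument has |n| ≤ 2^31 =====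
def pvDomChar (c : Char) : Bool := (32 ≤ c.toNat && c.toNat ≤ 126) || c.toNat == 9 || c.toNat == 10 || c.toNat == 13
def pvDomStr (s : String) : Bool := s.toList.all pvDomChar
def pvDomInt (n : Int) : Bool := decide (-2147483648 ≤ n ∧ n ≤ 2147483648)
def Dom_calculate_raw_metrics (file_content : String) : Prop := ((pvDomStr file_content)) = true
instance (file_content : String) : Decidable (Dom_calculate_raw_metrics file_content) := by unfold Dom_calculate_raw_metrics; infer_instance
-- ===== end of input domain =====

-- B replaces A's three separate scans of the line list with one classification pass
-- keeping four running counters (alternative decomposition, same asymptotic cost).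


-- ===== PORT A =====
-- lines = splitlines; loc = len; blank/comment = two generator sums; dict literal.
def calculate_raw_metrics (file_content : String) : List (String × Int) :=
  let lines := PySem.Str.splitlines file_content
  let loc : Int := lines.length
  let blank_lines : Int :=
    lines.foldl (fun a line => if PySem.Str.strip line == "" then a + 1 else a) 0
  let comment_lines : Int :=
    lines.foldl (fun a line => if PySem.Str.startswith (PySem.Str.strip line) "#" then a + 1 else a) 0
  [("LOC", loc), ("Blank", blank_lines), ("Comment", comment_lines),
   ("CodeOnly", loc - blank_lines - comment_lines)]

-- ===== PORT B =====
-- one pass: state = (loc, blank, comment, code), each line classified once.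
def pvAltStep (s : Int × Int × Int × Int) (line : String) : Int × Int × Int × Int :=
  let stripped := PySem.Str.strip line
  if stripped == "" then (s.1 + 1, s.2.1 + 1, s.2.2.1, s.2.2.2)
  else if PySem.Str.startswith stripped "#" then (s.1 + 1, s.2.1, s.2.2.1 + 1, s.2.2.2)
  else (s.1 + 1, s.2.1, s.2.2.1, s.2.2.2 + 1)

def calculate_raw_metrics_alt (file_content : String) : List (String × Int) :=
  let s := (PySem.Str.splitlines file_content).foldl pvAltStep (0, 0, 0, 0)
  [("LOC", s.1), ("Blank", s.2.1), ("Comment", s.2.2.1), ("CodeOnly", s.2.2.2)]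

-- ===== PRECONDITION & SPEC =====
def Spec_calculate_raw_metrics (file_content : String) (out : List (String × Int)) : Prop := out = calculate_raw_metrics_alt file_content
instance (file_content : String) (out : List (String × Int)) : Decidable (Spec_calculate_raw_metrics file_content out) := by unfold Spec_calculate_raw_metrics; infer_instance

-- ===== CLAIM (what is proved, stated in full; the proofs are below) =====
def Claim_equal_calculate_raw_metrics : Prop := ∀ (file_content : String), Dom_calculate_raw_metrics file_content → Spec_calculate_raw_metrics file_content (calculate_raw_metrics file_content)

-- ===== LEMMAS AND PROOFS =====

-- an A-style counting foldl is the countP of its predicate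
theorem pv_foldl_count (p : String → Bool) (ls : List String) : ∀ (a : Int),
    ls.foldl (fun x line => if p line then x + 1 else x) a = a + (ls.countP p : Int) := by
  induction ls with
  | nil => intro a; simp
  | cons h t ih =>
    intro a
    by_cases hp : p h
    · simp [List.foldl, hp, ih]; ring
    · simp [List.foldl, hp, ih]

-- a blank (fully-stripped-away) line does not start with '#'
theorem pv_blank_not_comment (line : String) (h : PySem.Str.strip line == "") :
    PySem.Str.startswith (PySem.Str.strip line) "#" = false := by
  have : PySem.Str.strip line = "" := by simpa using h
  rw [this]; decide

-- B's fold computes exactly A's three counts (code = loc − blank − comment)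
theorem pv_altStep_fold (ls : List String) : ∀ (a b c d : Int),
    ls.foldl pvAltStep (a, b, c, d) =
      (a + (ls.length : Int),
       b + (ls.countP (fun l => PySem.Str.strip l == "") : Int),
       c + (ls.countP (fun l => PySem.Str.startswith (PySem.Str.strip l) "#") : Int),
       d + ((ls.length : Int)
            - (ls.countP (fun l => PySem.Str.strip l == "") : Int)
            - (ls.countP (fun l => PySem.Str.startswith (PySem.Str.strip l) "#") : Int))) := by
  induction ls with
  | nil => intro a b c d; simp
  | cons h t ih =>
    intro a b c d
    by_cases hb : PySem.Str.strip h == ""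
    · have hc := pv_blank_not_comment h hb
      simp at hb hc
      simp [List.foldl, pvAltStep, hb, hc, ih, Prod.ext_iff]
      and_intros <;> ring
    · by_cases hc : PySem.Str.startswith (PySem.Str.strip h) "#"
      · simp at hb hc
        simp [List.foldl, pvAltStep, hb, hc, ih, Prod.ext_iff]
        and_intros <;> ring
      · simp at hb hc
        simp [List.foldl, pvAltStep, hb, hc, ih, Prod.ext_iff]
        and_intros <;> ring

-- ===== VERDICT (by name: the statement is the Claim_ definition above) =====
theorem calculate_raw_metrics_spec : Claim_equal_calculate_raw_metrics := by
  intro fc _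
  unfold Spec_calculate_raw_metrics calculate_raw_metrics calculate_raw_metrics_alt
  simp only [pv_altStep_fold, pv_foldl_count]
  norm_num
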